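-- pv_equiv track=rewrite | github.com/zpedro27/rosalind | solutions/ex_perfect-matchings/soln_legacy.py | get_basepair_edges
-- ===== SOURCE A (Python) =====
-- PAIRS = {"A": "U", "G": "C", "C": "G", "U": "A"}
--
-- def _label_bases(seq):
--     return [x + "_" + str(i) for i, x in enumerate(seq)]
--
-- def get_basepair_edges(seq):
--     edges = []
--
--     labeled_seq = _label_bases(seq)
--
--     for i, base in enumerate(labeled_seq):
--         b = base.split("_")[0]
--         edge_bp = [
--             (base, base2)
--             for base2 in labeled_seq[i + 1 :]
--             if base2.startswith(PAIRS[b])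
--         ]
--         edges += edge_bp
--
--     return edges
-- ===== SOURCE B (Python) =====
-- PAIRS = {"A": "U", "G": "C", "C": "G", "U": "A"}
--
-- def get_basepair_edges(seq):
--     # Single backward pass: maintain, per base letter, the ascending list of
--     # positions strictly after the current index; emit each i's block directly.
--     edges = []
--     after = {}
--     for i in range(len(seq) - 2, -1, -1):
--         c = seq[i + 1]
--         after[c] = [i + 1] + after.get(c, [])
--         comp = PAIRS[seq[i]]
--         lab = seq[i] + "_" + str(i)
--         edges = [(lab, seq[j] + "_" + str(j)) for j in after.get(comp, [])] + edges
--     return edges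
-- ===== Notes on version B (the rewrite author's own statement) =====
-- stated objective: alternative
-- what changed: A rescans the whole labelled suffix for every position; B makes one backward pass that maintains, per base letter, the ascending list of positions after the current index and emits each position's block from a single dictionary lookup.
import Mathlib
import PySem

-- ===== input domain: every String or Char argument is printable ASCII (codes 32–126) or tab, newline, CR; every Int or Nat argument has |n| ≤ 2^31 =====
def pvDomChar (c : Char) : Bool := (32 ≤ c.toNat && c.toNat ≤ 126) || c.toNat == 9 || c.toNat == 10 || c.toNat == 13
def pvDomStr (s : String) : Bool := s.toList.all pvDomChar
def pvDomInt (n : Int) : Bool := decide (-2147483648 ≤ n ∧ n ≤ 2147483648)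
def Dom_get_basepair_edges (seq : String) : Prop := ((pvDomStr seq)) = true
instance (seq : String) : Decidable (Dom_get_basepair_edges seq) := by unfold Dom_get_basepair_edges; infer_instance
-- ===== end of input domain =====

-- B replaces A's per-i rescan of the whole labelled suffix by a single backward pass that
-- maintains, per base letter, the ascending list of later positions (objective: alternative).

-- ===== PORT A =====
def pvPAIRS : PySem.Dict String String := PySem.Dict.ofList [("A", "U"), ("G", "C"), ("C", "G"), ("U", "A")]

def pv_label_bases (seq : String) : List String :=
  (PySem.List.enumerate seq.toList).map (fun p => String.ofList (p.2 :: '_' :: PySem.Int.toChars p.1))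

def get_basepair_edges (seq : String) : List (String × String) :=
  let labeled := pv_label_bases seq
  (PySem.List.enumerate labeled).foldl (fun edges p =>
    -- b = base.split("_")[0]; the split is always nonempty, so [0] never raises
    let b := (PySem.List.pyGet? ((PySem.Str.split? p.2 "_").getD []) 0).getD ""
    -- PAIRS[b]: KeyError (none) is excluded by Pre_
    let comp := pvPAIRS.getD b ""
    edges ++ ((PySem.List.slice labeled (some (p.1 + 1)) none).filter
        (fun base2 => PySem.Str.startswith base2 comp)).map (fun base2 => (p.2, base2)))
    []

-- ===== PORT B =====
def get_basepair_edges_alt (seq : String) : List (String × String) :=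
  let s := seq.toList
  ((PySem.List.pyRange ((s.length : Int) - 2) (-1) (-1)).foldl
    (fun st i =>
      let c := (PySem.List.pyGet? s (i + 1)).getD ' '
      let after := st.1.insert (String.ofList [c]) ((i + 1) :: st.1.getD (String.ofList [c]) [])
      -- PAIRS[seq[i]]: KeyError (none) is excluded by Pre_
      let comp := pvPAIRS.getD (String.ofList [(PySem.List.pyGet? s i).getD ' ']) ""
      let lab := String.ofList ((PySem.List.pyGet? s i).getD ' ' :: '_' :: PySem.Int.toChars i)
      (after,
        (after.getD comp []).map
          (fun j => (lab, String.ofList ((PySem.List.pyGet? s j).getD ' ' :: '_' :: PySem.Int.toChars j)))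
        ++ st.2))
    ((PySem.Dict.ofList [] : PySem.Dict String (List Int)), ([] : List (String × String)))).2

-- ===== PRECONDITION & SPEC =====
-- Pre_ excludes exactly the inputs on which A raises KeyError: PAIRS[b] is looked up for
-- every position except the last one (there the suffix is empty and the comprehension's
-- condition is never evaluated), so every character but possibly the last must be a base.
def Pre_get_basepair_edges (seq : String) : Prop :=
  (seq.toList.dropLast.all (fun c => c == 'A' || c == 'U' || c == 'G' || c == 'C')) = true
instance (seq : String) : Decidable (Pre_get_basepair_edges seq) := by
  unfold Pre_get_basepair_edges; infer_instance

def pvWitness_get_basepair_edges : String := "GAUCUA"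

def Spec_get_basepair_edges (seq : String) (out : List (String × String)) : Prop := out = get_basepair_edges_alt seq
instance (seq : String) (out : List (String × String)) : Decidable (Spec_get_basepair_edges seq out) := by unfold Spec_get_basepair_edges; infer_instance

-- ===== CLAIM (what is proved, stated in full; the proofs are below) =====
def Claim_equal_get_basepair_edges : Prop := ∀ (seq : String), Dom_get_basepair_edges seq → Pre_get_basepair_edges seq → Spec_get_basepair_edges seq (get_basepair_edges seq)

-- ===== LEMMAS AND PROOFS =====

-- the complement map, on the four bases
def pvCf (c : Char) : Char :=
  if c = 'A' then 'U' else if c = 'G' then 'C' else if c = 'C' then 'G' else 'A'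

-- the label "c_i" of position i
def pvLab (cs : List Char) (i : Nat) : String :=
  String.ofList (cs.getD i ' ' :: '_' :: PySem.Int.toChars (i : Int))

-- the block of edges contributed by position i
def pvBlock (cs : List Char) (i : Nat) : List (String × String) :=
  ((List.range' (i + 1) (cs.length - (i + 1))).filter
      (fun j => cs.getD j ' ' == pvCf (cs.getD i ' '))).map (fun j => (pvLab cs i, pvLab cs j))

-- positions ≥ m holding character c, ascending, as Ints
def pvPos (cs : List Char) (m : Nat) (c : Char) : List Int :=
  ((List.range' m (cs.length - m)).filter (fun j => cs.getD j ' ' == c)).map Int.ofNat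

theorem pv_enum {α : Type} (xs : List α) (d : α) : ∀ (k : Int),
    PySem.List.enumerate xs k = (List.range xs.length).map (fun (i : Nat) => ((k + (i : Int), xs.getD i d) : Int × α)) := by
  induction xs with
  | nil => intro k; simp [PySem.List.enumerate]
  | cons x t ih =>
    intro k
    rw [show (x :: t).length = t.length + 1 from rfl, List.range_succ_eq_map,
      PySem.List.enumerate, ih (k + 1)]
    simp only [List.map_cons, List.map_map]
    congr 1
    · simp
    · apply List.map_congr_left
      intro i _
      simp only [Function.comp_apply, List.getD_cons_succ]
      congr 1
      push_cast; ring

theorem pv_splitOn_go_acc (sep : List Char) : ∀ (fuel : Nat) (l cur : List Char) (acc : List (List Char)),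
    PySem.Chars.splitOn.go sep fuel l cur acc = acc.reverse ++ PySem.Chars.splitOn.go sep fuel l cur [] := by
  intro fuel
  induction fuel with
  | zero => intro l cur acc; simp [PySem.Chars.splitOn.go]
  | succ f ih =>
    intro l cur acc
    cases l with
    | nil => simp [PySem.Chars.splitOn.go]
    | cons c rest =>
      rw [PySem.Chars.splitOn.go, PySem.Chars.splitOn.go]
      by_cases h : sep.isPrefixOf (c :: rest) = true
      · simp only [h, if_true]
        rw [ih _ _ (cur.reverse :: acc), ih _ _ [cur.reverse]]
        simp
      · simp only [eq_false_of_ne_true h, Bool.false_eq_true, if_false]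
        rw [ih rest (c :: cur) acc]

theorem pv_split_head (c : Char) (hc : c ≠ '_') (ds : List Char) :
    ∃ rest, PySem.Chars.splitOn (c :: '_' :: ds) ['_'] = [c] :: rest := by
  unfold PySem.Chars.splitOn
  rw [show (c :: '_' :: ds).length + 1 = (ds.length + 2) + 1 by simp]
  rw [PySem.Chars.splitOn.go]
  rw [if_neg (by simp [List.isPrefixOf]; intro h; exact absurd h.symm hc)]
  rw [PySem.Chars.splitOn.go]
  rw [if_pos (by simp [List.isPrefixOf])]
  rw [pv_splitOn_go_acc]
  exact ⟨_, rfl⟩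

theorem pv_pyRange_neg_cons (k : Int) (hk : 0 ≤ k) :
    PySem.List.pyRange k (-1) (-1) = k :: PySem.List.pyRange (k - 1) (-1) (-1) := by
  rw [PySem.List.pyRange, PySem.List.pyRange]
  rw [if_neg (by norm_num), if_neg (by norm_num)]
  simp only [show ¬ ((0:Int) < -1) by norm_num, if_false]
  rw [if_pos (by omega)]
  have e1 : (k - -1 + -(-1) - 1) / -(-1) = k + 1 := by norm_num
  have h1 : ((k - -1 + -(-1) - 1) / -(-1) : Int).toNat = k.toNat + 1 := by rw [e1]; omega
  rw [h1, List.range_succ_eq_map, List.map_cons, List.map_map]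
  by_cases h2 : (-1 : Int) < k - 1
  · rw [if_pos h2]
    have e2 : (k - 1 - -1 + -(-1) - 1) / -(-1) = k := by norm_num
    have h3 : ((k - 1 - -1 + -(-1) - 1) / -(-1) : Int).toNat = k.toNat := by rw [e2]
    rw [h3]
    congr 1
    · omega
    · apply List.map_congr_left; intro i _; simp; ring
  · have hk0 : k = 0 := by omega
    subst hk0
    rw [if_neg h2]
    simp

-- a character strictly before the last position is one of the four bases
theorem pv_pre_char (seq : String) (h : Pre_get_basepair_edges seq) (i : Nat)
    (hi : i + 1 < seq.toList.length) :
    seq.toList.getD i ' ' = 'A' ∨ seq.toList.getD i ' ' = 'U' ∨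
    seq.toList.getD i ' ' = 'G' ∨ seq.toList.getD i ' ' = 'C' := by
  have hlen : i < seq.toList.dropLast.length := by
    simp only [List.length_dropLast]; omega
  have hd : seq.toList.dropLast[i] = seq.toList[i]'(by omega) := List.getElem_dropLast hlen
  have hmem : seq.toList[i]'(by omega) ∈ seq.toList.dropLast := hd ▸ List.getElem_mem hlen
  have := List.all_eq_true.mp h _ hmem
  rw [List.getD_eq_getElem?_getD, List.getElem?_eq_getElem (by omega)]
  simp only [Bool.or_eq_true, beq_iff_eq] at this
  tauto

theorem pv_pairs (c : Char)
    (h : c = 'A' ∨ c = 'U' ∨ c = 'G' ∨ c = 'C') :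
    pvPAIRS.getD (String.ofList [c]) "" = String.ofList [pvCf c] := by
  rcases h with h | h | h | h <;> subst h <;> decide

theorem pv_not_underscore (c : Char)
    (h : c = 'A' ∨ c = 'U' ∨ c = 'G' ∨ c = 'C') : c ≠ '_' := by
  rcases h with h | h | h | h <;> subst h <;> decide

-- base.split("_")[0] recovers the single base character of a label
theorem pv_b_eq (cs : List Char) (i : Nat) (hne : cs.getD i ' ' ≠ '_') :
    (PySem.List.pyGet? ((PySem.Str.split? (pvLab cs i) "_").getD []) 0).getD ""
      = String.ofList [cs.getD i ' '] := by
  obtain ⟨rest, hr⟩ := pv_split_head (cs.getD i ' ') hne (PySem.Int.toChars (i : Int))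
  rw [pvLab]
  rw [PySem.Str.split?]
  rw [show ("_" : String).toList = ['_'] from rfl, String.toList_ofList]
  rw [PySem.Chars.split?]
  rw [if_neg (by simp)]
  simp only [Option.map_some, Option.getD_some, hr, List.map_cons]
  simp [PySem.List.pyGet?, PySem.List.pyIdx?]

-- startswith on a label against a single-character prefix tests the label's base
theorem pv_startswith (cs : List Char) (j : Nat) (x : Char) :
    PySem.Str.startswith (pvLab cs j) (String.ofList [x]) = (cs.getD j ' ' == x) := by
  have : PySem.Str.startswith (pvLab cs j) (String.ofList [x])
      = PySem.Chars.startswith (cs.getD j ' ' :: '_' :: PySem.Int.toChars (j : Int)) [x] := by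
    simp [pvLab, PySem.Str.startswith]
  rw [this, PySem.Chars.startswith, List.isPrefixOf]
  simp [BEq.comm]

theorem pv_labeled (seq : String) :
    pv_label_bases seq = (List.range seq.toList.length).map (pvLab seq.toList) := by
  rw [pv_label_bases, pv_enum seq.toList ' ' 0, List.map_map]
  apply List.map_congr_left
  intro i _
  simp [pvLab]

theorem pvPos_cons (cs : List Char) (m : Nat) (c : Char) (hm : m < cs.length) :
    pvPos cs m c = if cs.getD m ' ' == c then (m : Int) :: pvPos cs (m + 1) c
      else pvPos cs (m + 1) c := by
  unfold pvPos
  rw [show cs.length - m = (cs.length - (m + 1)) + 1 by omega, List.range'_succ]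
  rw [List.filter_cons]
  by_cases h : (cs.getD m ' ' == c) = true
  · rw [if_pos h, if_pos h]; simp
  · rw [if_neg h, if_neg h]

theorem pv_A_norm (seq : String) (h : Pre_get_basepair_edges seq) :
    get_basepair_edges seq = (List.range seq.toList.length).flatMap (pvBlock seq.toList) := by
  unfold get_basepair_edges
  rw [pv_labeled]
  dsimp only
  rw [pv_enum _ "" 0, PySem.List.foldl_append_eq_flatMap, List.nil_append, List.flatMap_map]
  rw [List.flatMap, List.flatMap]
  simp only [List.length_map, List.length_range]
  congr 1
  apply List.map_congr_left
  intro i hi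
  have hin : i < seq.toList.length := by
    have := List.mem_range.mp hi; simpa using this
  simp only [zero_add]
  rw [List.getD_eq_getElem?_getD, List.getElem?_map, List.getElem?_range hin]
  simp only [Option.map_some, Option.getD_some]
  rw [PySem.List.slice_from _ (by omega : (0:Int) ≤ (i : Int) + 1)]
  rw [show ((i : Int) + 1).toNat = i + 1 by omega]
  rw [← List.map_drop, List.range_eq_range', List.drop_range']
  simp only [Nat.zero_add, Nat.mul_one]
  by_cases hlast : i + 1 < seq.toList.length
  · have hb := pv_pre_char seq h i hlast
    rw [pv_b_eq _ _ (pv_not_underscore _ hb), pv_pairs _ hb]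
    rw [List.filter_map, List.map_map, pvBlock]
    have hf := List.filter_congr (l := List.range' (i + 1) (seq.toList.length - (i + 1)))
      (fun j _ => by
        simpa only [Function.comp_apply] using
          pv_startswith seq.toList j (pvCf (seq.toList.getD i ' ')))
    simp only [Function.comp_def]
    rw [hf]
  · have hz : seq.toList.length - (i + 1) = 0 := by omega
    rw [hz, pvBlock, hz]
    simp only [List.range'_zero, List.map_nil, List.filter_nil]

-- one iteration of B's backward pass
theorem pv_step (seq : String) (h : Pre_get_basepair_edges seq) (a : Nat)
    (ha : a + 1 < seq.toList.length)
    (d : PySem.Dict String (List Int)) (es : List (String × String))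
    (hd : ∀ c : Char, d.getD (String.ofList [c]) [] = pvPos seq.toList (a + 2) c) :
    ∃ d' : PySem.Dict String (List Int),
      ((fun (st : PySem.Dict String (List Int) × List (String × String)) (i : Int) =>
        let c := (PySem.List.pyGet? seq.toList (i + 1)).getD ' '
        let after := st.1.insert (String.ofList [c]) ((i + 1) :: st.1.getD (String.ofList [c]) [])
        let comp := pvPAIRS.getD (String.ofList [(PySem.List.pyGet? seq.toList i).getD ' ']) ""
        let lab := String.ofList ((PySem.List.pyGet? seq.toList i).getD ' ' :: '_' :: PySem.Int.toChars i)
        (after,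
          (after.getD comp []).map
            (fun j => (lab, String.ofList ((PySem.List.pyGet? seq.toList j).getD ' ' :: '_' :: PySem.Int.toChars j)))
          ++ st.2)) (d, es) (a : Int))
        = (d', pvBlock seq.toList a ++ es)
      ∧ (∀ c : Char, d'.getD (String.ofList [c]) [] = pvPos seq.toList (a + 1) c) := by
  have hg : ∀ (m : Nat), (PySem.List.pyGet? seq.toList (m : Int)).getD ' ' = seq.toList.getD m ' ' := by
    intro m
    rw [PySem.List.pyGet?_natCast, ← List.getD_eq_getElem?_getD]
  have hg1 : (PySem.List.pyGet? seq.toList ((a : Int) + 1)).getD ' ' = seq.toList.getD (a + 1) ' ' := by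
    rw [show (a : Int) + 1 = ((a + 1 : Nat) : Int) by push_cast; ring, hg]
  dsimp only
  rw [hg1, hg a]
  set ch := seq.toList.getD (a + 1) ' ' with hch
  have hd' : ∀ c' : Char,
      (d.insert (String.ofList [ch]) (((a : Int) + 1) :: d.getD (String.ofList [ch]) [])).getD
        (String.ofList [c']) [] = pvPos seq.toList (a + 1) c' := by
    intro c'
    rw [PySem.Dict.getD_insert]
    by_cases hc : c' = ch
    · rw [if_pos (by rw [hc]), hc, hd, pvPos_cons seq.toList (a + 1) ch (by omega)]
      rw [if_pos (by simp only [beq_iff_eq]; rw [hch]),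
        show ((a + 1 : Nat) : Int) = (a : Int) + 1 by push_cast; ring]
    · rw [if_neg (fun he => hc (by
        have := congrArg String.toList he
        simpa using this)), hd, pvPos_cons seq.toList (a + 1) c' (by omega)]
      rw [if_neg (by simp only [beq_iff_eq]; exact fun he => hc (by rw [hch]; exact he.symm))]
  refine ⟨d.insert (String.ofList [ch]) (((a : Int) + 1) :: d.getD (String.ofList [ch]) []), ?_, hd'⟩
  have hpair := pv_pre_char seq h a ha
  rw [pv_pairs _ hpair, hd' (pvCf (seq.toList.getD a ' '))]
  refine congrArg (fun x => (_, x ++ es)) ?_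
  rw [pvPos, List.map_map, pvBlock]
  apply List.map_congr_left
  intro j hj
  simp only [Function.comp_apply, Int.ofNat_eq_natCast, hg j]
  rfl

-- the loop invariant of B's backward pass
theorem pv_loop (seq : String) (h : Pre_get_basepair_edges seq) : ∀ (a : Nat),
    a ≤ seq.toList.length - 1 →
    ∀ (d : PySem.Dict String (List Int)) (es : List (String × String)),
    (∀ c : Char, d.getD (String.ofList [c]) [] = pvPos seq.toList (a + 1) c) →
    ((PySem.List.pyRange ((a : Int) - 1) (-1) (-1)).foldl
      (fun st i =>
        let c := (PySem.List.pyGet? seq.toList (i + 1)).getD ' '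
        let after := st.1.insert (String.ofList [c]) ((i + 1) :: st.1.getD (String.ofList [c]) [])
        let comp := pvPAIRS.getD (String.ofList [(PySem.List.pyGet? seq.toList i).getD ' ']) ""
        let lab := String.ofList ((PySem.List.pyGet? seq.toList i).getD ' ' :: '_' :: PySem.Int.toChars i)
        (after,
          (after.getD comp []).map
            (fun j => (lab, String.ofList ((PySem.List.pyGet? seq.toList j).getD ' ' :: '_' :: PySem.Int.toChars j)))
          ++ st.2))
      (d, es)).2 = (List.range a).flatMap (pvBlock seq.toList) ++ es := by
  intro a
  induction a with
  | zero =>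
    intro _ d es _
    rw [show ((0 : Nat) : Int) - 1 = -1 by norm_num,
      show PySem.List.pyRange (-1) (-1) (-1) = [] from by decide]
    simp
  | succ a ih =>
    intro hle d es hd
    rw [show ((a + 1 : Nat) : Int) - 1 = (a : Int) by push_cast; ring,
      pv_pyRange_neg_cons _ (by positivity), List.foldl_cons]
    obtain ⟨d', hf, hd'⟩ := pv_step seq h a (by omega) d es hd
    dsimp only at hf
    dsimp only
    rw [hf, ih (by omega) d' (pvBlock seq.toList a ++ es) hd']
    rw [List.range_succ, List.flatMap_append]
    simp

theorem pv_B_norm (seq : String) (h : Pre_get_basepair_edges seq) :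
    get_basepair_edges_alt seq = (List.range (seq.toList.length - 1)).flatMap (pvBlock seq.toList) := by
  unfold get_basepair_edges_alt
  dsimp only
  rcases Nat.eq_zero_or_pos seq.toList.length with h0 | h1
  · rw [h0]
    rw [show ((0 : Nat) : Int) - 2 = -2 by norm_num,
      show PySem.List.pyRange (-2) (-1) (-1) = [] from by decide]
    simp
  · have he : ((seq.toList.length : Nat) : Int) - 2 = ((seq.toList.length - 1 : Nat) : Int) - 1 := by
      omega
    rw [he, pv_loop seq h (seq.toList.length - 1) (by omega) _ []
      (fun c => by
        rw [show PySem.Dict.getD (PySem.Dict.ofList []) (String.ofList [c]) [] = [] from rfl]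
        rw [pvPos, show seq.toList.length - (seq.toList.length - 1 + 1) = 0 by omega]
        simp)]
    simp

-- ===== VERDICT (by name: the statement is the Claim_ definition above) =====
theorem get_basepair_edges_spec : Claim_equal_get_basepair_edges := by
  intro seq _ hpre
  unfold Spec_get_basepair_edges
  rw [pv_A_norm seq hpre, pv_B_norm seq hpre]
  rcases Nat.eq_zero_or_pos seq.toList.length with h0 | h1
  · simp [h0]
  · have : seq.toList.length = (seq.toList.length - 1) + 1 := by omega
    rw [this, List.range_succ, List.flatMap_append]
    have hb : pvBlock seq.toList (seq.toList.length - 1) = [] := by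
      unfold pvBlock
      rw [show seq.toList.length - (seq.toList.length - 1 + 1) = 0 by omega]
      simp
    have hb' : pvBlock seq.toList (seq.length - 1) = [] := by simpa using hb
    simp [hb']
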